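-- pv_equiv track=rewrite | github.com/M157q/OJs | CheckiO/Github/Break PEP8.py | twist
-- ===== SOURCE A (Python) =====
-- def twist(t):
--     s,x,y='',',.!?(){}[]<>@#;:$%&*+-/=\^_`|~','.,?!)(}{][><#@:;$%&*+-/=\^_`|~'
--     for c in' '.join(t.split()):
--         s+=str(9-int(c))if c.isdigit()else c.swapcase()
--         s=s[:-1]+y[x.index(c)]if c in x else s
--     S,w='',[]
--     for c in s:
--         if not c.isalpha():
--             S=S[::-1]+c;w.append(S);S='';
--         else:
--             S+=c
--     return ''.join(w+[S[::-1]])or' 'if len(t)else''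
-- ===== SOURCE B (Python) =====
-- def twist(t):
--     if not t:
--         return ''
--     x = ',.!?(){}[]<>@#;:$%&*+-/=\^_`|~'
--     y = '.,?!)(}{][><#@:;$%&*+-/=\^_`|~'
--     s = ' '.join(t.split()).swapcase().translate(
--         str.maketrans(x + '0123456789', y + '9876543210'))
--     out = []
--     i, n = 0, len(s)
--     while i < n:
--         j = i
--         k = s[i].isalpha()
--         while j < n and s[j].isalpha() == k:
--             j += 1
--         out.append(s[i:j][::-1] if k else s[i:j])
--         i = j
--     return ''.join(out) or ' '
-- ===== Notes on version B (the rewrite author's own statement) =====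
-- stated objective: simpler
-- what changed: B replaces A's two character-at-a-time accumulator loops (append then patch the last character via y[x.index(c)]; build-and-flush reversed segments through S/w) by a single swapcase+translate mapping over the normalized string followed by a two-pointer scan over maximal isalpha runs that reverses only the alphabetic runs.
import Mathlib
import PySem

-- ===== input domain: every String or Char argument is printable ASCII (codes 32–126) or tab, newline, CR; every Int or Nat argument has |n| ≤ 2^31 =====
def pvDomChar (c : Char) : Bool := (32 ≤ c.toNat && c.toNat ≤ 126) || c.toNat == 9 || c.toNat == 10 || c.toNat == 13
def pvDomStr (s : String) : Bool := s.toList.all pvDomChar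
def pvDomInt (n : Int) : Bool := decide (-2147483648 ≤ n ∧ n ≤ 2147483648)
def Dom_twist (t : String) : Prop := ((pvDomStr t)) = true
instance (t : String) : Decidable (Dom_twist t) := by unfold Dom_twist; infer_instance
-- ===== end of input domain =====

set_option maxRecDepth 10000


-- B re-implements twist as one swapcase+translation map followed by a run-based
-- (two-pointer) scan that reverses alphabetic runs, instead of A's two
-- character-at-a-time accumulator loops with last-character patching (objective: simpler).

-- ===== PORT A =====
-- the two literal punctuation strings of A ('\^' in Python is backslash + caret)
def pvX : List Char := [',', '.', '!', '?', '(', ')', '{', '}', '[', ']', '<', '>', '@', '#', ';', ':', '$', '%', '&', '*', '+', '-', '/', '=', '\\', '^', '_', '`', '|', '~']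
def pvY : List Char := ['.', ',', '?', '!', ')', '(', '}', '{', ']', '[', '>', '<', '#', '@', ':', ';', '$', '%', '&', '*', '+', '-', '/', '=', '\\', '^', '_', '`', '|', '~']

-- c.swapcase(): exact for the ASCII domain Dom_twist admits
def pvSwapcase (c : Char) : Char :=
  if PySem.Chars.isupper c then PySem.Chars.lowerChar c
  else if PySem.Chars.islower c then PySem.Chars.upperChar c
  else c

-- one iteration of A's first loop: s += str(9-int(c)) if c.isdigit() else c.swapcase();
-- s = s[:-1]+y[x.index(c)] if c in x else s
-- (the `.getD 0` / default `c` of index?/pyGetD are unreachable: they are guarded by `c in x`)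
def pvStepA (s : List Char) (c : Char) : List Char :=
  let s := s ++ (if PySem.Chars.isdigit c then
                   PySem.Int.toChars (9 - ((PySem.Int.ofChars? [c]).getD 0))
                 else [pvSwapcase c])
  if pvX.contains c then
    PySem.List.slice s none (some (-1)) ++
      [PySem.List.pyGetD pvY (((PySem.List.index? pvX c).getD 0 : Nat) : Int) c]
  else s

-- one iteration of A's second loop over the pair (S, w); S[::-1] is reversal
-- (PySem.List.slice?_none_none_neg_one)
def pvStepA2 (p : List Char × List (List Char)) (c : Char) : List Char × List (List Char) :=
  if !(PySem.Chars.isalpha c) then ([], p.2 ++ [p.1.reverse ++ [c]])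
  else (p.1 ++ [c], p.2)

def twist (t : String) : String :=
  let s := (PySem.Chars.join [' '] (PySem.Chars.split₀ t.toList)).foldl pvStepA []
  let Sw := s.foldl pvStepA2 ([], [])
  let r := PySem.Chars.join [] (Sw.2 ++ [Sw.1.reverse])
  if PySem.Chars.len t.toList ≠ 0 then (if r = [] then " " else String.ofList r) else ""

-- ===== PORT B =====
-- str.maketrans(x+'0123456789', y+'9876543210') as a dict (all keys distinct)
def pvTable : PySem.Dict Char Char :=
  ⟨([',', '.', '!', '?', '(', ')', '{', '}', '[', ']', '<', '>', '@', '#', ';', ':', '$', '%', '&', '*', '+', '-', '/', '=', '\\', '^', '_', '`', '|', '~', '0', '1', '2', '3', '4', '5', '6', '7', '8', '9']).zip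
    (['.', ',', '?', '!', ')', '(', '}', '{', ']', '[', '>', '<', '#', '@', ':', ';', '$', '%', '&', '*', '+', '-', '/', '=', '\\', '^', '_', '`', '|', '~', '9', '8', '7', '6', '5', '4', '3', '2', '1', '0'])⟩

-- B's run scan: the outer while walks i over maximal runs of equal isalpha();
-- the inner while (j) is the takeWhile/dropWhile split of the remainder
def pvRuns : List Char → List Char
  | [] => []
  | c :: rest =>
    let k := PySem.Chars.isalpha c
    let run := rest.takeWhile (fun d => PySem.Chars.isalpha d == k)
    let rest' := rest.dropWhile (fun d => PySem.Chars.isalpha d == k)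
    (if k then (c :: run).reverse else c :: run) ++ pvRuns rest'
termination_by s => s.length
decreasing_by
  simp only [List.length_cons]
  exact Nat.lt_succ_of_le (List.length_dropWhile_le _ _)

def twist_alt (t : String) : String :=
  if t.toList = [] then "" else
    let s := ((PySem.Chars.join [' '] (PySem.Chars.split₀ t.toList)).map pvSwapcase).map
               (fun c => PySem.Dict.getD pvTable c c)
    let r := pvRuns s
    if r = [] then " " else String.ofList r

-- ===== PRECONDITION & SPEC =====
def Spec_twist (t : String) (out : String) : Prop := out = twist_alt t
instance (t : String) (out : String) : Decidable (Spec_twist t out) := by unfold Spec_twist; infer_instance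

-- ===== CLAIM (what is proved, stated in full; the proofs are below) =====
def Claim_equal_twist : Prop := ∀ (t : String), Dom_twist t → Spec_twist t (twist t)

-- ===== LEMMAS AND PROOFS =====

-- the per-character value A's first loop appends for c
def pvGChar (c : Char) : List Char :=
  if pvX.contains c then
    [PySem.List.pyGetD pvY (((PySem.List.index? pvX c).getD 0 : Nat) : Int) c]
  else if PySem.Chars.isdigit c then
    PySem.Int.toChars (9 - ((PySem.Int.ofChars? [c]).getD 0))
  else [pvSwapcase c]

-- the per-character value of B's two maps
def pvTChar (c : Char) : Char :=
  PySem.Dict.getD pvTable (pvSwapcase c) (pvSwapcase c)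

lemma pvX_not_digit : ∀ c ∈ pvX, PySem.Chars.isdigit c = false := by
  intro c hc; fin_cases hc <;> rfl

lemma stepA_eq (s : List Char) (c : Char) : pvStepA s c = s ++ pvGChar c := by
  unfold pvStepA pvGChar
  by_cases hx : c ∈ pvX
  · have hd : PySem.Chars.isdigit c = false := pvX_not_digit c hx
    simp [hx, hd, pysem]
  · simp [hx]

lemma keyFacts : ∀ p ∈ pvTable.items,
    (pvX.contains p.1 || PySem.Chars.isdigit p.1) = true ∧
    ¬(97 ≤ p.1.toNat ∧ p.1.toNat ≤ 122) ∧ ¬(65 ≤ p.1.toNat ∧ p.1.toNat ≤ 90) := by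
  decide

lemma char_le_iff (c d : Char) : c ≤ d ↔ c.toNat ≤ d.toNat := by
  rw [Char.le_def]; exact UInt32.le_iff_toNat_le

lemma isdigit_mem (c : Char) (h : PySem.Chars.isdigit c = true) :
    c ∈ ['0', '1', '2', '3', '4', '5', '6', '7', '8', '9'] := by
  simp only [PySem.Chars.isdigit, Bool.and_eq_true, decide_eq_true_eq, char_le_iff] at h
  have hc := Char.ofNat_toNat c
  have h1 : 48 ≤ c.toNat := h.1
  have h2 : c.toNat ≤ 57 := h.2
  have hor : c.toNat = 48 ∨ c.toNat = 49 ∨ c.toNat = 50 ∨ c.toNat = 51 ∨ c.toNat = 52 ∨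
      c.toNat = 53 ∨ c.toNat = 54 ∨ c.toNat = 55 ∨ c.toNat = 56 ∨ c.toNat = 57 := by omega
  rcases hor with h'|h'|h'|h'|h'|h'|h'|h'|h'|h' <;> (rw [← hc, h']; decide)

lemma isupper_bounds (c : Char) (h : PySem.Chars.isupper c = true) :
    65 ≤ c.toNat ∧ c.toNat ≤ 90 := by
  simpa only [PySem.Chars.isupper, Bool.and_eq_true, decide_eq_true_eq, char_le_iff] using h

lemma islower_bounds (c : Char) (h : PySem.Chars.islower c = true) :
    97 ≤ c.toNat ∧ c.toNat ≤ 122 := by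
  simpa only [PySem.Chars.islower, Bool.and_eq_true, decide_eq_true_eq, char_le_iff] using h

lemma getD_miss (k d : Char) (h : ∀ p ∈ pvTable.items, p.1 ≠ k) :
    PySem.Dict.getD pvTable k d = d := by
  unfold PySem.Dict.getD PySem.Dict.get?
  rw [List.find?_eq_none.mpr]
  · rfl
  · intro p hp
    simpa using h p hp

lemma sw_miss (c : Char) (hx : pvX.contains c = false)
    (hd : PySem.Chars.isdigit c = false) :
    ∀ p ∈ pvTable.items, p.1 ≠ pvSwapcase c := by
  intro p hp heq
  obtain ⟨hk1, hk2, hk3⟩ := keyFacts p hp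
  unfold pvSwapcase at heq
  by_cases hu : PySem.Chars.isupper c
  · obtain ⟨hb1, hb2⟩ := isupper_bounds c hu
    have hv : Nat.isValidChar (c.toNat + 32) := Or.inl (by omega)
    have hsw : (PySem.Chars.lowerChar c).toNat = c.toNat + 32 := by
      simp only [PySem.Chars.lowerChar, hu, if_true]
      rw [Char.toNat_ofNat, if_pos hv]
    rw [if_pos hu] at heq
    exact hk2 ⟨by rw [heq, hsw]; omega, by rw [heq, hsw]; omega⟩
  · by_cases hl : PySem.Chars.islower c
    · obtain ⟨hb1, hb2⟩ := islower_bounds c hl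
      have hv : Nat.isValidChar (c.toNat - 32) := Or.inl (by omega)
      have hsw : (PySem.Chars.upperChar c).toNat = c.toNat - 32 := by
        simp only [PySem.Chars.upperChar, hl, if_true]
        rw [Char.toNat_ofNat, if_pos hv]
      rw [if_neg (by simpa using hu), if_pos hl] at heq
      exact hk3 ⟨by rw [heq, hsw]; omega, by rw [heq, hsw]; omega⟩
    · rw [if_neg (by simpa using hu), if_neg (by simpa using hl)] at heq
      rw [heq] at hk1
      rcases Bool.or_eq_true_iff.mp hk1 with h | h
      · rw [hx] at h; exact Bool.false_ne_true h
      · rw [hd] at h; exact Bool.false_ne_true h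

lemma g_eq_t (c : Char) : pvGChar c = [pvTChar c] := by
  by_cases hx : pvX.contains c
  · have hc : c ∈ pvX := by simpa using hx
    fin_cases hc <;> decide
  · by_cases hd : PySem.Chars.isdigit c
    · have hc := isdigit_mem c hd
      fin_cases hc <;> decide
    · have hx' : pvX.contains c = false := by simpa using hx
      have hd' : PySem.Chars.isdigit c = false := by simpa using hd
      unfold pvGChar pvTChar
      rw [if_neg hx, if_neg hd]
      rw [getD_miss _ _ (sw_miss c hx' hd')]

lemma flatMap_g_eq (l : List Char) : l.flatMap pvGChar = l.map pvTChar := by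
  induction l with
  | nil => rfl
  | cons c l ih => simp [List.flatMap_cons, g_eq_t, ih]

lemma pass1 (l : List Char) :
    l.foldl pvStepA [] = l.map pvTChar := by
  have h : l.foldl pvStepA [] = l.foldl (fun s c => s ++ pvGChar c) [] := by
    apply PySem.List.foldl_congr_mem
    intro acc x _
    exact stepA_eq acc x
  rw [h, PySem.List.foldl_append_eq_flatMap, List.nil_append, flatMap_g_eq]

-- A's second loop, char by char, with the pending run S as parameter
def pvG2 (S : List Char) : List Char → List Char
  | [] => S.reverse
  | c :: cs =>
    if PySem.Chars.isalpha c then pvG2 (S ++ [c]) cs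
    else S.reverse ++ c :: pvG2 [] cs

lemma pass2_fold (cs : List Char) : ∀ S w,
    ((cs.foldl pvStepA2 (S, w)).2.flatten ++ (cs.foldl pvStepA2 (S, w)).1.reverse)
      = w.flatten ++ pvG2 S cs := by
  induction cs with
  | nil => intro S w; simp [pvG2]
  | cons c cs ih =>
    intro S w
    by_cases h : PySem.Chars.isalpha c
    · simp [List.foldl_cons, pvStepA2, h, pvG2, ih]
    · simp [List.foldl_cons, pvStepA2, h, pvG2, ih]

lemma beq_true_fun :
    (fun d => PySem.Chars.isalpha d == true) = (fun d => PySem.Chars.isalpha d) := by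
  funext d; simp

lemma runs_span (cs : List Char) :
    pvRuns cs = (cs.takeWhile PySem.Chars.isalpha).reverse ++
                 pvRuns (cs.dropWhile PySem.Chars.isalpha) := by
  cases cs with
  | nil => simp
  | cons c r =>
    by_cases h : PySem.Chars.isalpha c
    · rw [pvRuns]
      simp [h, beq_true_fun]
    · simp [h]

lemma runs_nonalpha_span (cs : List Char) :
    pvRuns cs = cs.takeWhile (fun d => PySem.Chars.isalpha d == false) ++
                 pvRuns (cs.dropWhile (fun d => PySem.Chars.isalpha d == false)) := by
  cases cs with
  | nil => simp
  | cons d r =>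
    by_cases hd : PySem.Chars.isalpha d
    · simp [hd]
    · rw [pvRuns]
      have hd' : PySem.Chars.isalpha d = false := by simpa using hd
      simp only [hd', List.takeWhile_cons, List.dropWhile_cons]
      simp

lemma runs_cons_nonalpha (c : Char) (cs : List Char) (h : PySem.Chars.isalpha c = false) :
    pvRuns (c :: cs) = c :: pvRuns cs := by
  rw [pvRuns]
  simp only [h, Bool.false_eq_true, if_false, List.cons_append, List.cons.injEq, true_and]
  exact (runs_nonalpha_span cs).symm

lemma g2_eq (cs : List Char) : ∀ S,
    pvG2 S cs = (cs.takeWhile PySem.Chars.isalpha).reverse ++ S.reverse ++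
                 pvRuns (cs.dropWhile PySem.Chars.isalpha) := by
  induction cs with
  | nil => intro S; simp [pvG2, pvRuns]
  | cons c cs ih =>
    intro S
    by_cases h : PySem.Chars.isalpha c
    · simp [pvG2, h, ih]
    · have h2 : pvG2 [] cs = pvRuns cs := by
        rw [ih []]
        simp only [List.reverse_nil, List.append_nil]
        exact (runs_span cs).symm
      simp [pvG2, h, runs_cons_nonalpha c cs (by simpa using h), h2]

lemma pass2 (cs : List Char) :
    ((cs.foldl pvStepA2 ([], [])).2 ++ [(cs.foldl pvStepA2 ([], [])).1.reverse]).flatten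
      = pvRuns cs := by
  have h := pass2_fold cs [] []
  simp only [List.flatten_nil, List.nil_append] at h
  rw [List.flatten_append]
  simp only [List.flatten_cons, List.flatten_nil, List.append_nil]
  rw [h, g2_eq cs []]
  simp only [List.reverse_nil, List.append_nil]
  exact (runs_span cs).symm

lemma map_comp_eq (l : List Char) :
    (l.map pvSwapcase).map (fun c => PySem.Dict.getD pvTable c c) = l.map pvTChar := by
  rw [List.map_map]; rfl

lemma join_nil_sep (l : List (List Char)) : PySem.Chars.join [] l = l.flatten := by
  unfold PySem.Chars.join
  induction l with
  | nil => rfl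
  | cons a l ih => cases l with
    | nil => simp [List.intercalate]
    | cons b m => simp_all [List.intercalate, List.intersperse]

-- ===== VERDICT (by name: the statement is the Claim_ definition above) =====
theorem twist_spec : Claim_equal_twist := by
  intro t _
  unfold Spec_twist twist twist_alt
  dsimp only
  rw [pass1, map_comp_eq, join_nil_sep, pass2]
  generalize pvRuns ((PySem.Chars.join [' '] (PySem.Chars.split₀ t.toList)).map pvTChar) = r
  by_cases ht : t.toList = []
  · simp [ht, PySem.Chars.len]
  · have ht2 : ¬ t = "" := by simpa using ht
    simp [ht, ht2, PySem.Chars.len]
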